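-- pv_equiv track=rewrite | github.com/Aryudesu/ABC | ABC/229/D.py | calc
-- ===== SOURCE A (Python) =====
-- def calc(S, K):
--     data = []
--     count = 0
--     for s in S:
--         if s == "X":
--             count += 1
--         else:
--             data.append(count)
--             count = 0
--     data.append(count)
--     if len(data) <= K + 1:
--         return len(S)
--     result = 0
--     num = 0
--     for k in range(K + 1):
--         num += data[k]
--     result = num
--     for k in range(K + 1, len(data)):
--         num -= data[k - K - 1]
--         num += data[k]
--         if result < num:
--             result = num
--     return result + K
-- ===== SOURCE B (Python) =====
-- def calc(S, K):
--     dots = [i for i, c in enumerate(S) if c != "X"]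
--     if len(dots) <= K:
--         return len(S)
--     Q = [-1] + dots + [len(S)]
--     return max(hi - lo - 1 for lo, hi in zip(Q, Q[K + 1:]))
-- ===== Notes on version B (the rewrite author's own statement) =====
-- stated objective: simpler
-- what changed: B collects the positions of the dots and returns the maximum gap between dot positions K+1 apart (with sentinels -1 and len(S)), instead of A's run-length-of-X list with an explicit sliding-window sum-and-max loop.
import Mathlib
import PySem

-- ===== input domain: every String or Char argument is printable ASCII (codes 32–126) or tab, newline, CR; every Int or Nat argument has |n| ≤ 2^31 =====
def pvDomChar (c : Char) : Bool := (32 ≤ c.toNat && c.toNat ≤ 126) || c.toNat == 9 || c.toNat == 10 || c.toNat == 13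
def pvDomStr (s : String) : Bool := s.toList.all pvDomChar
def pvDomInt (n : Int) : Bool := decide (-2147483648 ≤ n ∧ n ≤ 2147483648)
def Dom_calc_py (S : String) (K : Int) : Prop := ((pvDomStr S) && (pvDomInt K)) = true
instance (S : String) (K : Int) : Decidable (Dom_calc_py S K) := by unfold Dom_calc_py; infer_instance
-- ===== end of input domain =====

-- B replaces A's run-length list and sliding-window sum with dot positions and max gap between
-- positions K+1 apart; equivalence is proved for K ≥ -1 (for K ≤ -2 A raises IndexError); same O(n) cost, simpler code.

-- ===== PORT A =====
-- 'for s in S: if s == "X": count += 1 else: data.append(count); count = 0'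
def foldA (S : String) : List Int × Int :=
  S.toList.foldl (fun p s => if s = 'X' then (p.1, p.2 + 1) else (p.1 ++ [p.2], 0))
    (([] : List Int), (0 : Int))

-- 'data.append(count)' after the loop
def dataA (S : String) : List Int := (foldA S).1 ++ [(foldA S).2]

def calc_py (S : String) (K : Int) : Int :=
  if ((dataA S).length : Int) ≤ K + 1 then (S.toList.length : Int)
  else
    -- result = 0; num = 0; for k in range(K+1): num += data[k]; result = num
    -- (data[k] is always in range here; pyGetD's default is never used)
    let num : Int := (PySem.List.pyRange 0 (K + 1) 1).foldl
      (fun a k => a + PySem.List.pyGetD (dataA S) k 0) 0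
    let result : Int := num
    -- for k in range(K+1, len(data)): num -= data[k-K-1]; num += data[k]; if result < num: result = num
    let r := (PySem.List.pyRange (K + 1) ((dataA S).length : Int) 1).foldl
      (fun (rn : Int × Int) k =>
        let nu := rn.2 - PySem.List.pyGetD (dataA S) (k - K - 1) 0 + PySem.List.pyGetD (dataA S) k 0
        (if rn.1 < nu then nu else rn.1, nu)) (result, num)
    r.1 + K

-- ===== PORT B =====
-- dots = [i for i, c in enumerate(S) if c != "X"]
def dotsB (S : String) : List Int :=
  ((PySem.List.enumerate S.toList 0).filter (fun p => p.2 != 'X')).map (fun p => p.1)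

def calc_py_alt (S : String) (K : Int) : Int :=
  let n : Int := (S.toList.length : Int)
  if ((dotsB S).length : Int) ≤ K then n
  else
    let Q : List Int := [-1] ++ dotsB S ++ [n]
    -- max(hi - lo - 1 for lo, hi in zip(Q, Q[K+1:]))  (nonempty under Pre_; getD's default unused)
    ((PySem.List.max? ((Q.zip (PySem.List.slice Q (some (K + 1)) none)).map
        (fun p => p.2 - p.1 - 1)) (fun x => x)).getD 0)

-- ===== PRECONDITION & SPEC =====
-- Pre_ excludes exactly K ≤ -2, on which A raises IndexError (data[k-K-1] runs past the end).
def Pre_calc_py (S : String) (K : Int) : Prop := -1 ≤ K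
instance (S : String) (K : Int) : Decidable (Pre_calc_py S K) := by unfold Pre_calc_py; infer_instance

def pvWitness_calc_py : String × Int := ("XX..X.XXX", 1)

def Spec_calc_py (S : String) (K : Int) (out : Int) : Prop := out = calc_py_alt S K
instance (S : String) (K : Int) (out : Int) : Decidable (Spec_calc_py S K out) := by unfold Spec_calc_py; infer_instance

-- ===== CLAIM (what is proved, stated in full; the proofs are below) =====
def Claim_equal_calc_py : Prop := ∀ (S : String) (K : Int), Dom_calc_py S K → Pre_calc_py S K → Spec_calc_py S K (calc_py S K)

-- ===== LEMMAS AND PROOFS =====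

-- gap list of consecutive positions: gapsL [q0,q1,...] = [q1-q0-1, q2-q1-1, ...]
def gapsL : List Int → List Int
  | a :: b :: t => (b - a - 1) :: gapsL (b :: t)
  | _ => []

theorem length_gapsL (l : List Int) : (gapsL l).length = l.length - 1 := by
  induction l using gapsL.induct with
  | case1 a b t ih => simp [gapsL, ih]
  | case2 l h => cases l with
    | nil => simp [gapsL]
    | cons a t => cases t with
      | nil => simp [gapsL]
      | cons b t => exact absurd rfl (h a b t)

theorem gapsL_getD (l : List Int) (m : Nat) (h : m + 1 < l.length) :
    (gapsL l).getD m 0 = l.getD (m + 1) 0 - l.getD m 0 - 1 := by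
  induction l using gapsL.induct generalizing m with
  | case1 a b t ih =>
    cases m with
    | zero => simp [gapsL]
    | succ m' =>
      have h' : m' + 1 < (b :: t).length := by simpa using h
      simp only [gapsL, List.getD_cons_succ]
      exact ih m' h'
  | case2 l hne => cases l with
    | nil => simp at h
    | cons a t => cases t with
      | nil => simp at h
      | cons b t => exact absurd rfl (hne a b t)

theorem gapsL_concat (l : List Int) (a : Int) (h : l ≠ []) :
    gapsL (l ++ [a]) = gapsL l ++ [a - l.getLastD 0 - 1] := by
  induction l using gapsL.induct with
  | case1 x y t ih =>
    simp only [List.cons_append, gapsL, List.getLastD_cons]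
    have ih' := ih (by simp)
    simp only [List.cons_append] at ih'
    rw [ih', List.getLastD_cons]
  | case2 l hne => cases l with
    | nil => exact absurd rfl h
    | cons x t => cases t with
      | nil => simp [gapsL]
      | cons b t => exact absurd rfl (hne x b t)

theorem dotsB_concat (cs : List Char) (c : Char) :
    ((PySem.List.enumerate (cs ++ [c]) 0).filter (fun p => p.2 != 'X')).map (fun p => p.1)
      = ((PySem.List.enumerate cs 0).filter (fun p => p.2 != 'X')).map (fun p => p.1)
        ++ (if c = 'X' then [] else [(cs.length : Int)]) := by
  rw [PySem.List.enumerate_append]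
  rw [PySem.List.enumerate_cons, PySem.List.enumerate_nil]
  rw [List.filter_append, List.map_append]
  by_cases hc : c = 'X' <;> simp [hc]

theorem foldA_list (cs : List Char) :
    cs.foldl (fun p s => if s = 'X' then (p.1, p.2 + 1) else (p.1 ++ [p.2], 0))
      (([] : List Int), (0 : Int))
    = (gapsL (-1 :: ((PySem.List.enumerate cs 0).filter (fun p => p.2 != 'X')).map (fun p => p.1)),
       (cs.length : Int)
         - (-1 :: ((PySem.List.enumerate cs 0).filter (fun p => p.2 != 'X')).map (fun p => p.1)).getLastD 0
         - 1) := by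
  induction cs using List.reverseRecOn with
  | nil => simp [gapsL, PySem.List.enumerate_nil]
  | append_singleton cs c ih =>
    rw [List.foldl_append, ih, dotsB_concat]
    simp only [List.foldl_cons, List.foldl_nil]
    by_cases hc : c = 'X'
    · rw [if_pos hc, if_pos hc, List.append_nil]
      refine Prod.ext rfl ?_
      simp only [List.length_append, List.length_singleton]
      push_cast
      ring
    · rw [if_neg hc, if_neg hc]
      rw [show (-1 :: (((PySem.List.enumerate cs 0).filter (fun p => p.2 != 'X')).map (fun p => p.1) ++ [(cs.length : Int)]))
            = ((-1 :: ((PySem.List.enumerate cs 0).filter (fun p => p.2 != 'X')).map (fun p => p.1)) ++ [(cs.length : Int)]) by simp]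
      rw [gapsL_concat _ _ (by simp), List.getLastD_concat]
      refine Prod.ext rfl ?_
      simp only [List.length_append, List.length_singleton]
      push_cast
      ring

theorem foldA_eq (S : String) :
    foldA S = (gapsL (-1 :: dotsB S),
      (S.toList.length : Int) - (-1 :: dotsB S).getLastD 0 - 1) := by
  unfold foldA dotsB
  exact foldA_list S.toList

theorem dataA_eq (S : String) :
    dataA S = gapsL (-1 :: (dotsB S ++ [(S.toList.length : Int)])) := by
  unfold dataA
  rw [foldA_eq]
  rw [show (-1 :: (dotsB S ++ [(S.toList.length : Int)]))
        = ((-1 :: dotsB S) ++ [(S.toList.length : Int)]) by simp]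
  rw [gapsL_concat _ _ (by simp)]

theorem if_max (r x : Int) : (if r < x then x else r) = max r x := by
  rcases lt_or_ge r x with h | h
  · simp [h, max_eq_right h.le]
  · simp [not_lt.mpr h, max_eq_left h]

theorem foldl_max_shift (l : List Int) (a c : Int) :
    (l.map (fun x => x + c)).foldl max (a + c) = l.foldl max a + c := by
  induction l generalizing a with
  | nil => rfl
  | cons x t ih =>
    simp only [List.map_cons, List.foldl_cons, Int.max_add_right]
    exact ih (max a x)

-- the initial-window sum loop
theorem sum_loop (data Q : List Int)
    (hd : ∀ m : Nat, m < data.length → data.getD m 0 = Q.getD (m + 1) 0 - Q.getD m 0 - 1)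
    (m : Nat) (hm : m ≤ data.length) :
    (PySem.List.pyRange 0 (m : Int) 1).foldl (fun a k => a + PySem.List.pyGetD data k 0) 0
      = Q.getD m 0 - Q.getD 0 0 - m := by
  induction m with
  | zero => simp [PySem.List.pyRange_one_eq_nil]
  | succ m' ih =>
    rw [show ((m' + 1 : Nat) : Int) = (m' : Int) + 1 by push_cast; ring]
    rw [PySem.List.pyRange_one_succ_right (by positivity)]
    rw [List.foldl_append]
    simp only [List.foldl_cons, List.foldl_nil, PySem.List.pyGetD_natCast]
    rw [ih (by omega), hd m' (by omega)]
    ring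

-- the sliding-window loop
theorem main_loop (data Q : List Int) (d : Nat) (hd1 : 1 ≤ d)
    (hd : ∀ m : Nat, m < data.length → data.getD m 0 = Q.getD (m + 1) 0 - Q.getD m 0 - 1)
    (t : Nat) (ht : d + t ≤ data.length) (r0 : Int) :
    (PySem.List.pyRange (d : Int) ((d + t : Nat) : Int) 1).foldl
      (fun (rn : Int × Int) k =>
        (if rn.1 < rn.2 - PySem.List.pyGetD data (k - (d : Int)) 0 + PySem.List.pyGetD data k 0
         then rn.2 - PySem.List.pyGetD data (k - (d : Int)) 0 + PySem.List.pyGetD data k 0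
         else rn.1,
         rn.2 - PySem.List.pyGetD data (k - (d : Int)) 0 + PySem.List.pyGetD data k 0))
      (r0, Q.getD d 0 - Q.getD 0 0 - d)
    = (((List.range t).map (fun j => Q.getD (j + 1 + d) 0 - Q.getD (j + 1) 0 - (d : Int))).foldl
         (fun r x => if r < x then x else r) r0,
       Q.getD (t + d) 0 - Q.getD t 0 - d) := by
  induction t generalizing r0 with
  | zero =>
    rw [show ((d + 0 : Nat) : Int) = (d : Int) by push_cast; ring]
    rw [PySem.List.pyRange_one_eq_nil (by omega)]
    simp
  | succ t' ih =>
    rw [show ((d + (t' + 1) : Nat) : Int) = ((d + t' : Nat) : Int) + 1 by push_cast; ring]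
    rw [PySem.List.pyRange_one_succ_right (by push_cast; omega)]
    rw [List.foldl_append, ih (by omega)]
    simp only [List.foldl_cons, List.foldl_nil]
    have e1 : ((d + t' : Nat) : Int) - (d : Int) = ((t' : Nat) : Int) := by push_cast; ring
    rw [e1]
    simp only [PySem.List.pyGetD_natCast]
    rw [hd t' (by omega), hd (d + t') (by omega)]
    have enu : Q.getD (t' + d) 0 - Q.getD t' 0 - (d : Int)
        - (Q.getD (t' + 1) 0 - Q.getD t' 0 - 1)
        + (Q.getD (d + t' + 1) 0 - Q.getD (d + t') 0 - 1)
        = Q.getD (t' + 1 + d) 0 - Q.getD (t' + 1) 0 - (d : Int) := by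
      rw [show t' + 1 + d = d + t' + 1 by ring, show t' + d = d + t' by ring]
      ring
    refine Prod.ext ?_ ?_
    · show (if _ < _ then _ else _) = _
      rw [List.range_succ, List.map_append, List.foldl_append]
      simp only [List.map_cons, List.map_nil, List.foldl_cons, List.foldl_nil]
      rw [enu]
    · show _ = Q.getD (t' + 1 + d) 0 - Q.getD (t' + 1) 0 - (d : Int)
      rw [enu]

-- B's zipped gap list written by index
theorem zip_map_eq (Q : List Int) (d : Nat) (hd : d ≤ Q.length) :
    (Q.zip (Q.drop d)).map (fun p => p.2 - p.1 - 1)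
      = (List.range (Q.length - d)).map (fun j => Q.getD (j + d) 0 - Q.getD j 0 - 1) := by
  apply List.ext_getElem
  · simp [List.length_zip, List.length_drop]
  · intro i h1 h2
    have hi : i < Q.length - d := by simpa using h2
    simp only [List.getElem_map, List.getElem_zip, List.getElem_drop, List.getElem_range]
    rw [show i + d = d + i by omega]
    rw [List.getD_eq_getElem Q 0 (by omega), List.getD_eq_getElem Q 0 (by omega)]

-- at K = -1 the sliding loop keeps the state (0, 0)
theorem loop_keep_zero (data : List Int) (l : List Int) :
    l.foldl (fun (rn : Int × Int) k =>
      (if rn.1 < rn.2 - PySem.List.pyGetD data (k - (-1 : Int) - 1) 0 + PySem.List.pyGetD data k 0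
       then rn.2 - PySem.List.pyGetD data (k - (-1 : Int) - 1) 0 + PySem.List.pyGetD data k 0
       else rn.1,
       rn.2 - PySem.List.pyGetD data (k - (-1 : Int) - 1) 0 + PySem.List.pyGetD data k 0))
      (0, 0) = (0, 0) := by
  induction l with
  | nil => rfl
  | cons x t ih =>
    simp only [List.foldl_cons]
    rw [show x - (-1 : Int) - 1 = x by ring]
    rw [show (0 : Int) - PySem.List.pyGetD data x 0 + PySem.List.pyGetD data x 0 = 0 by ring]
    simpa using ih

theorem zip_self_gaps (Q : List Int) :
    (Q.zip Q).map (fun p => p.2 - p.1 - 1) = Q.map (fun _ => (-1 : Int)) := by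
  induction Q with
  | nil => rfl
  | cons x t ih => simp [ih]

theorem foldl_max_neg_one (l : List Int) :
    (l.map (fun _ => (-1 : Int))).foldl max (-1) = -1 := by
  induction l with
  | nil => rfl
  | cons x t ih => simpa using ih

-- ===== VERDICT (by name: the statement is the Claim_ definition above) =====
theorem calc_py_spec : Claim_equal_calc_py := by
  intro S K hDom hK
  unfold Spec_calc_py
  have hK' : -1 ≤ K := hK
  by_cases hneg : K = -1
  · subst hneg
    simp only [calc_py, calc_py_alt]
    have hlenA : 1 ≤ (dataA S).length := by unfold dataA; simp
    rw [if_neg (show ¬ ((dataA S).length : Int) ≤ -1 + 1 by omega)]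
    rw [if_neg (show ¬ (((dotsB S).length : Int) ≤ -1) by omega)]
    rw [show (-1 : Int) + 1 = 0 by ring]
    rw [PySem.List.pyRange_one_eq_nil (le_refl 0)]
    simp only [List.foldl_nil]
    rw [loop_keep_zero]
    rw [PySem.List.slice_zero_start, PySem.List.slice_none_none]
    rw [zip_self_gaps]
    simp only [List.singleton_append]
    rw [List.cons_append, List.map_cons, PySem.List.max?_id_cons, Option.getD_some, foldl_max_neg_one]
    norm_num
  obtain ⟨k0, rfl⟩ : ∃ k0 : Nat, K = (k0 : Int) := ⟨K.toNat, (Int.toNat_of_nonneg (by omega)).symm⟩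
  simp only [calc_py, calc_py_alt]
  have hdata : dataA S = gapsL (-1 :: (dotsB S ++ [(S.toList.length : Int)])) := dataA_eq S
  set Q : List Int := -1 :: (dotsB S ++ [(S.toList.length : Int)]) with hQ
  have hQlen : Q.length = (dotsB S).length + 2 := by simp [hQ]
  have hlen : (dataA S).length = (dotsB S).length + 1 := by
    rw [hdata, length_gapsL]
    omega
  by_cases hbr : ((dataA S).length : Int) ≤ (k0 : Int) + 1
  · rw [if_pos hbr, if_pos (show ((dotsB S).length : Int) ≤ (k0 : Int) by omega)]
  · rw [if_neg hbr, if_neg (show ¬ ((dotsB S).length : Int) ≤ (k0 : Int) by omega)]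
    have hk1 : k0 + 1 < (dataA S).length := by omega
    set d : Nat := k0 + 1 with hdd
    set T : Nat := (dataA S).length - d with hT
    have hdgetd : ∀ m : Nat, m < (dataA S).length →
        (dataA S).getD m 0 = Q.getD (m + 1) 0 - Q.getD m 0 - 1 := by
      intro m hm
      rw [hdata]
      exact gapsL_getD Q m (by omega)
    have hcast : ((k0 : Int) + 1) = ((d : Nat) : Int) := by rw [hdd]; push_cast; ring
    rw [hcast]
    rw [sum_loop (dataA S) Q hdgetd d (by omega)]
    have hfun : (fun (rn : Int × Int) k =>
        (if rn.1 < rn.2 - PySem.List.pyGetD (dataA S) (k - (k0 : Int) - 1) 0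
            + PySem.List.pyGetD (dataA S) k 0
         then rn.2 - PySem.List.pyGetD (dataA S) (k - (k0 : Int) - 1) 0
            + PySem.List.pyGetD (dataA S) k 0
         else rn.1,
         rn.2 - PySem.List.pyGetD (dataA S) (k - (k0 : Int) - 1) 0
            + PySem.List.pyGetD (dataA S) k 0)) = (fun (rn : Int × Int) k =>
        (if rn.1 < rn.2 - PySem.List.pyGetD (dataA S) (k - ((d : Nat) : Int)) 0
            + PySem.List.pyGetD (dataA S) k 0
         then rn.2 - PySem.List.pyGetD (dataA S) (k - ((d : Nat) : Int)) 0
            + PySem.List.pyGetD (dataA S) k 0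
         else rn.1,
         rn.2 - PySem.List.pyGetD (dataA S) (k - ((d : Nat) : Int)) 0
            + PySem.List.pyGetD (dataA S) k 0)) := by
      funext rn k
      rw [show k - (k0 : Int) - 1 = k - ((d : Nat) : Int) by rw [hdd]; push_cast; ring]
    rw [hfun]
    rw [show ((dataA S).length : Int) = ((d + T : Nat) : Int) by push_cast; omega]
    rw [main_loop (dataA S) Q d (by omega) hdgetd T (by omega)]
    -- B side
    rw [show ([-1] ++ dotsB S ++ [(S.toList.length : Int)]) = Q by simp [hQ]]
    rw [PySem.List.slice_from_natCast]
    rw [zip_map_eq Q d (by omega)]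
    rw [show Q.length - d = T + 1 by omega]
    rw [List.range_succ_eq_map]
    simp only [List.map_cons, List.map_map, Function.comp_def, Nat.succ_eq_add_one]
    rw [PySem.List.max?_id_cons]
    simp only [Option.getD_some]
    have hifmax : (fun (r x : Int) => if r < x then x else r) = (fun (r x : Int) => max r x) := by
      funext r x
      exact if_max r x
    rw [hifmax]
    have hmaps : (List.range T).map (fun j => Q.getD (j + 1 + d) 0 - Q.getD (j + 1) 0 - 1)
        = ((List.range T).map
            (fun j => Q.getD (j + 1 + d) 0 - Q.getD (j + 1) 0 - ((d : Nat) : Int))).map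
              (fun x => x + (k0 : Int)) := by
      rw [List.map_map]
      apply List.map_congr_left
      intro j _
      simp only [Function.comp_apply]
      rw [hdd]
      push_cast
      ring
    rw [hmaps]
    rw [show (Q.getD (0 + d) 0 - Q.getD 0 0 - 1)
        = (Q.getD d 0 - Q.getD 0 0 - ((d : Nat) : Int)) + (k0 : Int) by
      rw [show (0 : Nat) + d = d by omega, hdd]; push_cast; ring]
    rw [foldl_max_shift]
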